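-- pv_equiv track=rewrite | github.com/weiyangzen/awesome_algorithms | Algorithms/数学-字符串算法-0524-后缀数组_-_DC3／Skew/demo.py | _radix_pass
-- ===== SOURCE A (Python) =====
-- from typing import List, Sequence, Tuple
--
-- def _radix_pass(indices: Sequence[int], s: Sequence[int], offset: int, k: int) -> List[int]:
--     """Stable counting sort of indices by key s[i + offset]."""
--     count = [0] * (k + 2)
--     out = [0] * len(indices)
--
--     for idx in indices:
--         count[s[idx + offset] + 1] += 1
--
--     for i in range(1, len(count)):
--         count[i] += count[i - 1]
--
--     for idx in indices:
--         key = s[idx + offset]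
--         out[count[key]] = idx
--         count[key] += 1
--
--     return out
-- ===== SOURCE B (Python) =====
-- from typing import List, Sequence
--
--
-- def _radix_pass(indices: Sequence[int], s: Sequence[int], offset: int, k: int) -> List[int]:
--     """Stable bucket sort of indices by key s[i + offset]: gather into one
--     list per key value, then concatenate the buckets in key order."""
--     buckets = [[] for _ in range(k + 1)]
--     for i in indices:
--         buckets[s[i + offset]].append(i)
--     out = []
--     for b in buckets:
--         out.extend(b)
--     return out
-- ===== Notes on version B (the rewrite author's own statement) =====
-- stated objective: simpler
-- what changed: Replaces the three-pass counting sort (histogram, prefix sums, scatter into a preallocated output by cursor positions) with a single gather pass appending each index to its key's bucket list followed by concatenating the buckets; no count array, no prefix sums, no scatter.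
-- outside the precondition, e.g. on _radix_pass([0, 1], [-2, 1], 0, 2): A returns [1, 0], B returns [0, 1]
import Mathlib
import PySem

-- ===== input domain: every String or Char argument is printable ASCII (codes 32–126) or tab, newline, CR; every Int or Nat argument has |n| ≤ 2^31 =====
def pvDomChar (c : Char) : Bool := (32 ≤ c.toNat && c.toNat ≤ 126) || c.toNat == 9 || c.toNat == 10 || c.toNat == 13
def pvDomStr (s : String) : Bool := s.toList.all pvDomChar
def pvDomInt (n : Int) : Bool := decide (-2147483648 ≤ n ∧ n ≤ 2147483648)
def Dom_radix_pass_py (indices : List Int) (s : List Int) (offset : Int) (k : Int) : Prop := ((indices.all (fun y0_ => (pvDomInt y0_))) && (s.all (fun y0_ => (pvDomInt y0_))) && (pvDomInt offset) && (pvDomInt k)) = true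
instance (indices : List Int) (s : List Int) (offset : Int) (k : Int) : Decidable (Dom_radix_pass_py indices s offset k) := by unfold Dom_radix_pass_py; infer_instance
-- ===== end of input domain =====

-- B replaces the counting sort (histogram + prefix sums + scatter) by a bucket
-- gather (append each index to its key's bucket, concatenate the buckets):
-- structurally simpler, same asymptotic cost.

-- ===== PORT A =====
-- literal transliteration of A: count array, histogram pass, prefix-sum pass,
-- scatter pass writing into a preallocated output.
def radix_pass_py (indices : List Int) (s : List Int) (offset : Int) (k : Int) : List Int :=
  let count0 : List Int := List.replicate (k + 2).toNat 0
  let out0 : List Int := List.replicate indices.length 0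
  let count1 : List Int := indices.foldl (fun c idx =>
      PySem.List.pySetD c (PySem.List.pyGetD s (idx + offset) 0 + 1)
        (PySem.List.pyGetD c (PySem.List.pyGetD s (idx + offset) 0 + 1) 0 + 1)) count0
  let count2 : List Int := (PySem.List.pyRange 1 (count1.length : Int) 1).foldl (fun c i =>
      PySem.List.pySetD c i (PySem.List.pyGetD c i 0 + PySem.List.pyGetD c (i - 1) 0)) count1
  let st : List Int × List Int := indices.foldl (fun p idx =>
      let key := PySem.List.pyGetD s (idx + offset) 0
      (PySem.List.pySetD p.1 key (PySem.List.pyGetD p.1 key 0 + 1),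
       PySem.List.pySetD p.2 (PySem.List.pyGetD p.1 key 0) idx)) (count2, out0)
  st.2

-- ===== PORT B =====
-- literal transliteration of B: one gather pass into buckets, then extend.
def radix_pass_py_alt (indices : List Int) (s : List Int) (offset : Int) (k : Int) : List Int :=
  let buckets0 : List (List Int) := List.replicate (k + 1).toNat []
  let buckets1 : List (List Int) := indices.foldl (fun bs i =>
      let key := PySem.List.pyGetD s (i + offset) 0
      PySem.List.pySetD bs key (PySem.List.pyGetD bs key [] ++ [i])) buckets0
  buckets1.foldl (fun out b => out ++ b) []

-- ===== PRECONDITION & SPEC =====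
-- Pre_ excludes inputs where some access s[i+offset] is out of range (A raises
-- IndexError) or some key s[i+offset] lies outside [0, k]: there A either raises
-- IndexError on the count/out arrays or, via negative-index wraparound in the
-- count array, returns an accidental ordering.
def Pre_radix_pass_py (indices : List Int) (s : List Int) (offset : Int) (k : Int) : Prop :=
  ∀ i ∈ indices, PySem.Raise.InRange s.length (i + offset) ∧
    0 ≤ PySem.List.pyGetD s (i + offset) 0 ∧ PySem.List.pyGetD s (i + offset) 0 ≤ k
instance (indices : List Int) (s : List Int) (offset : Int) (k : Int) : Decidable (Pre_radix_pass_py indices s offset k) := by unfold Pre_radix_pass_py; infer_instance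

def pvWitness_radix_pass_py : List Int × List Int × Int × Int := ([2, 0, 1, 3], [1, 0, 1, 0], 0, 1)

def Spec_radix_pass_py (indices : List Int) (s : List Int) (offset : Int) (k : Int) (out : List Int) : Prop := out = radix_pass_py_alt indices s offset k
instance (indices : List Int) (s : List Int) (offset : Int) (k : Int) (out : List Int) : Decidable (Spec_radix_pass_py indices s offset k out) := by unfold Spec_radix_pass_py; infer_instance

-- ===== CLAIM (what is proved, stated in full; the proofs are below) =====
def Claim_equal_radix_pass_py : Prop := ∀ (indices : List Int) (s : List Int) (offset : Int) (k : Int), Dom_radix_pass_py indices s offset k → Pre_radix_pass_py indices s offset k → Spec_radix_pass_py indices s offset k (radix_pass_py indices s offset k)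

-- ===== LEMMAS AND PROOFS =====

-- map-over-range representation of Python arrays
theorem pv_set_map_range {α : Type} (m j : Nat) (c : Nat → α) (v : α) :
    ((List.range m).map c).set j v = (List.range m).map (fun u => if u = j then v else c u) := by
  apply List.ext_getElem
  · simp
  · intro i h1 h2
    simp only [List.getElem_set, List.getElem_map, List.getElem_range]
    split_ifs with h h' h'
    · rfl
    · omega
    · omega
    · rfl

theorem pv_getD_map_range {α : Type} [Inhabited α] (m j : Nat) (c : Nat → α) (d : α) (hj : j < m) :
    ((List.range m).map c).getD j d = c j := by
  rw [List.getD_eq_getElem?_getD]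
  simp [List.getElem?_map, List.getElem?_range hj]

theorem pv_map_range_congr {α : Type} (m : Nat) (c c' : Nat → α) (h : ∀ j < m, c j = c' j) :
    (List.range m).map c = (List.range m).map c' := by
  apply List.map_congr_left
  intro j hj
  exact h j (List.mem_range.mp hj)

-- A's first loop (histogram): counting into slot key+1
theorem pv_hist_loop (f : Int → Int) (g : Int → Nat) (m : Nat) :
    ∀ (l : List Int) (c : Nat → Int),
    (∀ a ∈ l, f a = (g a : Int) ∧ g a + 2 ≤ m) →
    l.foldl (fun cl idx =>
        PySem.List.pySetD cl (f idx + 1) (PySem.List.pyGetD cl (f idx + 1) 0 + 1))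
      ((List.range m).map c)
    = (List.range m).map (fun j => c j + (l.countP (fun a => g a + 1 == j) : Int)) := by
  intro l
  induction l with
  | nil => intro c _; simp
  | cons a t ih =>
    intro c hl
    obtain ⟨hfa, hga⟩ := hl a (by simp)
    have hcast : f a + 1 = ((g a + 1 : Nat) : Int) := by rw [hfa]; push_cast; ring
    rw [List.foldl_cons, hcast, PySem.List.pySetD_natCast, PySem.List.pyGetD_natCast,
      pv_getD_map_range m (g a + 1) c 0 (by omega), pv_set_map_range]
    rw [ih _ (fun x hx => hl x (by simp [hx]))]
    apply pv_map_range_congr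
    intro j hj
    by_cases hj' : j = g a + 1
    · subst hj'
      simp
      ring
    · have hne : ((g a + 1 == j) = true) = False := by simp; omega
      simp [hj', hne]

-- A's second loop (prefix sums over the count array)
theorem pv_psum_loop (m : Nat) :
    ∀ (t : Nat), t ≤ m → ∀ (c : Nat → Int),
    (PySem.List.pyRange 1 (t : Int) 1).foldl
        (fun cl i => PySem.List.pySetD cl i (PySem.List.pyGetD cl i 0 + PySem.List.pyGetD cl (i - 1) 0))
        ((List.range m).map c)
    = (List.range m).map (fun j => if j < t then ((List.range (j + 1)).map c).sum else c j) := by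
  intro t
  induction t with
  | zero =>
    intro _ c
    rw [PySem.List.pyRange_one_eq_nil (by norm_num)]
    simp
  | succ t ih =>
    intro ht c
    by_cases ht0 : t = 0
    · subst ht0
      rw [show ((1 : Nat) : Int) = 1 by norm_num, PySem.List.pyRange_one_eq_nil (by norm_num)]
      simp only [List.foldl_nil]
      apply pv_map_range_congr
      intro j hj
      by_cases hj0 : j < 1
      · have : j = 0 := by omega
        subst this
        simp
      · simp [hj0]
    · have h1t : (1 : Int) ≤ (t : Int) := by omega
      rw [show ((t + 1 : Nat) : Int) = (t : Int) + 1 by push_cast; ring,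
        PySem.List.pyRange_one_succ_right h1t, List.foldl_append, ih (by omega) c]
      simp only [List.foldl_cons, List.foldl_nil]
      have htm : t < m := by omega
      have hcast1 : ((t : Nat) : Int) - 1 = ((t - 1 : Nat) : Int) := by omega
      rw [PySem.List.pySetD_natCast, PySem.List.pyGetD_natCast, hcast1, PySem.List.pyGetD_natCast,
        pv_getD_map_range m t _ 0 htm, pv_getD_map_range m (t - 1) _ 0 (by omega),
        pv_set_map_range]
      apply pv_map_range_congr
      intro j hj
      by_cases hjt : j = t
      · subst hjt
        simp only [if_neg (show ¬ j < j by omega), if_pos (show j - 1 < j by omega),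
          if_pos (show j < j + 1 by omega), if_pos trivial]
        have key : ((List.range (j + 1)).map c).sum
            = ((List.range (j - 1 + 1)).map c).sum + c j := by
          rw [show j - 1 + 1 = j from by omega, List.range_succ, List.map_append, List.sum_append]
          simp
        rw [key]
        ring
      · have : (if j < t then ((List.range (j + 1)).map c).sum else c j)
            = (if j < t + 1 then ((List.range (j + 1)).map c).sum else c j) := by
          by_cases h : j < t
          · rw [if_pos h, if_pos (by omega)]
          · rw [if_neg h, if_neg (by omega)]
        simp [hjt, this]

def pvCnt (g : Int → Nat) (l : List Int) (v : Nat) : Nat := l.countP (fun a => g a == v)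

def pvBase (g : Int → Nat) (l : List Int) (j : Nat) : Nat := ((List.range j).map (pvCnt g l)).sum

def pvPieces (g : Int → Nat) (B : Nat) (l P : List Int) : List (List Int) :=
  (List.range B).map (fun v =>
    P.filter (fun a => g a == v) ++ List.replicate (pvCnt g l v - pvCnt g P v) (0 : Int))

-- prefix sums of the (shifted) histogram are the bucket bases
theorem pv_sum_hist (g : Int → Nat) (l : List Int) :
    ∀ j : Nat, ((List.range (j + 1)).map (fun t => (0 : Int) + (l.countP (fun a => g a + 1 == t) : Int))).sum
      = (pvBase g l j : Int) := by
  intro j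
  induction j with
  | zero =>
    simp [pvBase]
  | succ j ih =>
    rw [List.range_succ, List.map_append, List.sum_append, ih]
    have hcnt : l.countP (fun a => g a + 1 == j + 1) = pvCnt g l j := by
      unfold pvCnt
      apply List.countP_congr
      intro a _
      simp
    simp only [List.map_cons, List.map_nil, List.sum_cons, List.sum_nil, hcnt]
    simp [pvBase, List.range_succ]

-- setting one cell of a flattened list of pieces = setting inside one piece
theorem pv_flatten_set :
    ∀ (ps : List (List Int)) (v : Nat) (hv : v < ps.length) (i : Nat) (x : Int),
      i < ps[v].length →
      ps.flatten.set (((ps.take v).map List.length).sum + i) x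
        = (ps.set v (ps[v].set i x)).flatten := by
  intro ps
  induction ps with
  | nil => intro v hv; simp at hv
  | cons q ps' ih =>
    intro v hv i x hi
    cases v with
    | zero =>
      simp only [List.take_zero, List.map_nil, List.sum_nil, Nat.zero_add,
        List.flatten_cons, List.set_cons_zero, List.getElem_cons_zero] at *
      rw [List.set_append]
      simp [hi]
    | succ v' =>
      simp only [List.take_succ_cons, List.map_cons, List.sum_cons, List.flatten_cons,
        List.set_cons_succ, List.getElem_cons_succ] at *
      rw [Nat.add_assoc, List.set_append]
      have : ¬ (q.length + (((ps'.take v').map List.length).sum + i) < q.length) := by omega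
      rw [if_neg this]
      simp only [Nat.add_sub_cancel_left]
      rw [ih v' (by simp at hv; omega) i x hi]

theorem pv_cnt_append (g : Int → Nat) (P Q : List Int) (v : Nat) :
    pvCnt g (P ++ Q) v = pvCnt g P v + pvCnt g Q v := by
  simp [pvCnt, List.countP_append]

-- A's third loop (scatter): the count array holds base+filled cursors and the
-- output is the flattened partially-filled buckets
theorem pv_scatter_loop (f : Int → Int) (g : Int → Nat) (K : Nat) (l : List Int)
    (hl : ∀ a ∈ l, f a = (g a : Int) ∧ g a ≤ K) :
    ∀ (rest P : List Int), P ++ rest = l →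
    rest.foldl (fun (p : List Int × List Int) idx =>
        (PySem.List.pySetD p.1 (f idx) (PySem.List.pyGetD p.1 (f idx) 0 + 1),
         PySem.List.pySetD p.2 (PySem.List.pyGetD p.1 (f idx) 0) idx))
      ((List.range (K + 2)).map (fun j => ((pvBase g l j + pvCnt g P j : Nat) : Int)),
       (pvPieces g (K + 1) l P).flatten)
    = ((List.range (K + 2)).map (fun j => ((pvBase g l j + pvCnt g l j : Nat) : Int)),
       (pvPieces g (K + 1) l l).flatten) := by
  intro rest
  induction rest with
  | nil =>
    intro P hPl
    simp only [List.append_nil] at hPl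
    subst hPl
    rfl
  | cons a rest' ih =>
    intro P hPl
    have hal : a ∈ l := by rw [← hPl]; simp
    obtain ⟨hfa, hga⟩ := hl a hal
    set v := g a with hv
    have hsplit : ∀ j, pvCnt g l j = pvCnt g P j + pvCnt g (a :: rest') j := by
      intro j; rw [← hPl, pv_cnt_append]
    have hbeqv : (g a == v) = true := by simp [hv]
    have hvpos : pvCnt g (a :: rest') v ≥ 1 := by
      simp only [pvCnt, List.countP_cons, hbeqv]
      simp
    have hlt : pvCnt g P v < pvCnt g l v := by
      have := hsplit v; omega
    have hle : ∀ j, pvCnt g P j ≤ pvCnt g l j := by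
      intro j; have := hsplit j; omega
    rw [List.foldl_cons]
    have hgetc : PySem.List.pyGetD
        ((List.range (K + 2)).map (fun j => ((pvBase g l j + pvCnt g P j : Nat) : Int))) (f a) 0
        = ((pvBase g l v + pvCnt g P v : Nat) : Int) := by
      rw [hfa, PySem.List.pyGetD_natCast]
      exact pv_getD_map_range _ _ _ _ (by omega)
    have hsetc : PySem.List.pySetD
        ((List.range (K + 2)).map (fun j => ((pvBase g l j + pvCnt g P j : Nat) : Int))) (f a)
        (((pvBase g l v + pvCnt g P v : Nat) : Int) + 1)
        = (List.range (K + 2)).map (fun j => ((pvBase g l j + pvCnt g (P ++ [a]) j : Nat) : Int)) := by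
      rw [hfa, PySem.List.pySetD_natCast, pv_set_map_range]
      apply pv_map_range_congr
      intro j hj
      rw [pv_cnt_append]
      by_cases hjv : j = v
      · subst hjv
        simp [pvCnt, List.countP_cons]
        rw [if_pos hv.symm]
        ring
      · have h0 : pvCnt g [a] j = 0 := by
          simp [pvCnt]
          omega
        simp [hjv, h0]
    have hsets : PySem.List.pySetD ((pvPieces g (K + 1) l P).flatten)
        (((pvBase g l v + pvCnt g P v : Nat) : Int)) a
        = (pvPieces g (K + 1) l (P ++ [a])).flatten := by
      rw [PySem.List.pySetD_natCast]
      have hvlen : v < (pvPieces g (K + 1) l P).length := by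
        simp [pvPieces]; omega
      have hpsv : (pvPieces g (K + 1) l P)[v] =
          P.filter (fun x => g x == v) ++ List.replicate (pvCnt g l v - pvCnt g P v) (0 : Int) := by
        simp [pvPieces]
      have hflen : (P.filter (fun x => g x == v)).length = pvCnt g P v := by
        simp [pvCnt, List.countP_eq_length_filter]
      have hi : pvCnt g P v < (pvPieces g (K + 1) l P)[v].length := by
        rw [hpsv]
        simp [hflen]
        omega
      have htake : (((pvPieces g (K + 1) l P).take v).map List.length).sum = pvBase g l v := by
        unfold pvPieces
        rw [← List.map_take, List.take_range, Nat.min_eq_left (by omega : v ≤ K + 1), List.map_map]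
        unfold pvBase
        apply congrArg
        apply pv_map_range_congr
        intro j hj
        have h1 : (P.filter (fun x => g x == j)).length = pvCnt g P j := by
          simp [pvCnt, List.countP_eq_length_filter]
        simp [h1]
        have := hle j
        omega
      rw [show pvBase g l v + pvCnt g P v
          = (((pvPieces g (K + 1) l P).take v).map List.length).sum + pvCnt g P v from by rw [htake]]
      rw [pv_flatten_set _ v hvlen _ a hi]
      congr 1
      rw [hpsv]
      have hset1 : (P.filter (fun x => g x == v) ++ List.replicate (pvCnt g l v - pvCnt g P v) (0 : Int)).set (pvCnt g P v) a
          = P.filter (fun x => g x == v) ++ a :: List.replicate (pvCnt g l v - pvCnt g P v - 1) 0 := by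
        rw [List.set_append, if_neg (by rw [hflen]; omega), hflen, Nat.sub_self,
          show pvCnt g l v - pvCnt g P v = (pvCnt g l v - pvCnt g P v - 1) + 1 from by omega,
          List.replicate_succ, List.set_cons_zero, Nat.add_sub_cancel]
      rw [hset1]
      unfold pvPieces
      rw [pv_set_map_range]
      apply pv_map_range_congr
      intro j hj
      by_cases hjv : j = v
      · rw [if_pos hjv, hjv, List.filter_append, pv_cnt_append,
          show List.filter (fun x => g x == v) [a] = [a] from by simp [hbeqv],
          show pvCnt g [a] v = 1 from by simp [pvCnt, hbeqv],
          show pvCnt g l v - (pvCnt g P v + 1) = pvCnt g l v - pvCnt g P v - 1 from by omega]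
        simp
      · have hbeqj : (g a == j) = false := by
          simp only [beq_eq_false_iff_ne, ne_eq]
          omega
        rw [if_neg hjv, List.filter_append, pv_cnt_append,
          show List.filter (fun x => g x == j) [a] = [] from by simp [hbeqj],
          show pvCnt g [a] j = 0 from by simp [pvCnt, hbeqj]]
        simp
    simp only []
    rw [hgetc, hsetc, hsets]
    exact ih (P ++ [a]) (by simpa [List.append_assoc] using hPl)

-- B's gather loop fills the buckets with the stably filtered indices
theorem pv_bucket_loop (f : Int → Int) (g : Int → Nat) (B : Nat) :
    ∀ (l : List Int) (h : Nat → List Int),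
    (∀ a ∈ l, f a = (g a : Int) ∧ g a < B) →
    l.foldl (fun bs i =>
        PySem.List.pySetD bs (f i) (PySem.List.pyGetD bs (f i) [] ++ [i]))
      ((List.range B).map h)
    = (List.range B).map (fun v => h v ++ l.filter (fun a => g a == v)) := by
  intro l
  induction l with
  | nil => intro h _; simp
  | cons a t ih =>
    intro h hl
    obtain ⟨hfa, hga⟩ := hl a (by simp)
    rw [List.foldl_cons, hfa, PySem.List.pySetD_natCast, PySem.List.pyGetD_natCast,
      pv_getD_map_range B (g a) h [] hga, pv_set_map_range,
      ih _ (fun x hx => hl x (by simp [hx]))]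
    apply pv_map_range_congr
    intro j hj
    by_cases hjv : j = g a
    · rw [if_pos hjv, hjv]
      rw [List.filter_cons_of_pos (by simp)]
      simp
    · rw [if_neg hjv]
      rw [List.filter_cons_of_neg (by simp; omega)]

theorem pv_sum_indicator (w B : Nat) (hw : w < B) :
    ((List.range B).map (fun v => if w = v then (1 : Nat) else 0)).sum = 1 := by
  induction B with
  | zero => omega
  | succ B ih =>
    rw [List.range_succ, List.map_append, List.sum_append]
    by_cases h : w = B
    · subst h
      have h0 : ((List.range w).map (fun v => if w = v then (1 : Nat) else 0)).sum = 0 := by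
        apply List.sum_eq_zero
        intro x hx
        simp at hx
        obtain ⟨j, hj, hjx⟩ := hx
        rw [if_neg (by omega)] at hjx
        omega
      simp [h0]
    · rw [ih (by omega)]
      simp [h]

-- total count over all buckets is the length
theorem pv_sum_cnt (g : Int → Nat) (B : Nat) :
    ∀ (l : List Int), (∀ a ∈ l, g a < B) →
    ((List.range B).map (fun v => pvCnt g l v)).sum = l.length := by
  intro l
  induction l with
  | nil =>
    intro _
    simp [pvCnt]
  | cons a t ih =>
    intro hl
    have hga : g a < B := hl a (by simp)
    have hsplit : ∀ v, pvCnt g (a :: t) v = pvCnt g t v + (if g a = v then 1 else 0) := by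
      intro v
      simp [pvCnt, List.countP_cons]
    calc ((List.range B).map (fun v => pvCnt g (a :: t) v)).sum
        = ((List.range B).map (fun v => pvCnt g t v + (if g a = v then 1 else 0))).sum := by
          rw [pv_map_range_congr B _ _ (fun j _ => hsplit j)]
      _ = ((List.range B).map (fun v => pvCnt g t v)).sum
            + ((List.range B).map (fun v => if g a = v then 1 else 0)).sum := by
          rw [← List.sum_map_add]
      _ = t.length + 1 := by
          rw [ih (fun x hx => hl x (by simp [hx]))]
          congr 1
          exact pv_sum_indicator (g a) B hga
      _ = (a :: t).length := by simp

theorem pv_replicate_eq_map_range {α : Type} (n : Nat) (x : α) :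
    List.replicate n x = (List.range n).map (fun _ => x) := by
  induction n with
  | zero => simp
  | succ n ih => rw [List.range_succ, List.map_append, List.replicate_succ', ih]; rfl

theorem pv_flatten_replicate (n : Nat) (c : Nat → Nat) :
    ((List.range n).map (fun v => List.replicate (c v) (0 : Int))).flatten
      = List.replicate (((List.range n).map c).sum) 0 := by
  induction n with
  | zero => simp
  | succ n ih =>
    rw [List.range_succ, List.map_append, List.flatten_append, ih, List.map_append,
      List.sum_append, List.replicate_add]
    simp

-- ===== VERDICT (by name: the statement is the Claim_ definition above) =====
theorem radix_pass_py_spec : Claim_equal_radix_pass_py := by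
  intro indices s offset k _ hpre
  unfold Spec_radix_pass_py
  simp only [radix_pass_py, radix_pass_py_alt]
  by_cases hnil : indices = []
  · subst hnil
    simp [PySem.List.foldl_append_eq_flatten]
  · obtain ⟨a0, ha0⟩ : ∃ a, a ∈ indices := by
      cases indices with
      | nil => exact absurd rfl hnil
      | cons x xs => exact ⟨x, by simp⟩
    have hk0 : (0 : Int) ≤ k := le_trans (hpre a0 ha0).2.1 (hpre a0 ha0).2.2
    set K := k.toNat with hK
    have hkK : k = (K : Int) := by omega
    have hm2 : (k + 2).toNat = K + 2 := by omega
    have hm1 : (k + 1).toNat = K + 1 := by omega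
    set f : Int → Int := fun i => PySem.List.pyGetD s (i + offset) 0 with hf
    set g : Int → Nat := fun i => (f i).toNat with hg
    have hfg : ∀ a ∈ indices, f a = ((g a : Nat) : Int) ∧ g a ≤ K := by
      intro a ha
      have h1 : (0 : Int) ≤ f a := (hpre a ha).2.1
      have h2 : f a ≤ k := (hpre a ha).2.2
      constructor
      · simp only [hg]; omega
      · simp only [hg]; omega
    rw [hm2, hm1, pv_replicate_eq_map_range (K + 2) (0 : Int),
      pv_replicate_eq_map_range (K + 1) ([] : List Int)]
    -- histogram pass
    rw [pv_hist_loop f g (K + 2) indices (fun _ => 0)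
      (fun a ha => ⟨(hfg a ha).1, by have := (hfg a ha).2; omega⟩)]
    -- prefix-sum pass
    rw [List.length_map, List.length_range, pv_psum_loop (K + 2) (K + 2) le_rfl]
    -- the count array now holds the bucket bases
    rw [pv_map_range_congr (K + 2) _
      (fun j => ((pvBase g indices j + pvCnt g ([] : List Int) j : Nat) : Int))
      (by
        intro j hj
        rw [if_pos hj, pv_sum_hist g indices j]
        simp [pvCnt])]
    -- the initial output array is the flattened empty buckets
    have hout : (List.replicate indices.length (0 : Int))
        = (pvPieces g (K + 1) indices ([] : List Int)).flatten := by
      unfold pvPieces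
      rw [pv_map_range_congr (K + 1) _
        (fun v => List.replicate (pvCnt g indices v) (0 : Int)) (by
          intro j hj
          simp [pvCnt])]
      rw [pv_flatten_replicate (K + 1) (pvCnt g indices),
        pv_sum_cnt g (K + 1) indices (fun a ha => by have := (hfg a ha).2; omega)]
    rw [hout]
    -- scatter pass
    rw [pv_scatter_loop f g K indices hfg indices [] (by simp)]
    -- B side: gather pass, then concatenation = flatten
    rw [pv_bucket_loop f g (K + 1) indices (fun _ => [])
      (fun a ha => ⟨(hfg a ha).1, by have := (hfg a ha).2; omega⟩)]
    rw [PySem.List.foldl_append_eq_flatten]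
    simp only [List.nil_append]
    -- both sides are the flattened buckets
    unfold pvPieces
    apply congrArg
    apply pv_map_range_congr
    intro j hj
    simp
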